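-- pv_equiv track=rewrite | github.com/rrshidev/PythonAdvancedCourse | 4-6-4.py | fill_matrix
-- ===== SOURCE A (Python) =====
-- def fill_matrix(n, m):
--     matrix = []
--     for r in range(n):
--         limit_cnt = 1 + r
--         nums = []
--         for c in range(m):
--             nums.append(limit_cnt)
--             limit_cnt += n
--         matrix.append(nums)
--
--     return matrix
-- ===== SOURCE B (Python) =====
-- def fill_matrix(n, m):
--     if n <= 0:
--         return []
--     flat = list(range(1, n * m + 1))
--     return [flat[r::n] for r in range(n)]
-- ===== Notes on version B (the rewrite author's own statement) =====
-- stated objective: alternative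
-- what changed: Instead of nested loops maintaining a per-cell running accumulator, B builds the flat list range(1, n*m+1) once and cuts it into rows with strided slices flat[r::n], so rows come from slicing a precomputed sequence rather than incremental per-cell arithmetic.
import Mathlib
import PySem

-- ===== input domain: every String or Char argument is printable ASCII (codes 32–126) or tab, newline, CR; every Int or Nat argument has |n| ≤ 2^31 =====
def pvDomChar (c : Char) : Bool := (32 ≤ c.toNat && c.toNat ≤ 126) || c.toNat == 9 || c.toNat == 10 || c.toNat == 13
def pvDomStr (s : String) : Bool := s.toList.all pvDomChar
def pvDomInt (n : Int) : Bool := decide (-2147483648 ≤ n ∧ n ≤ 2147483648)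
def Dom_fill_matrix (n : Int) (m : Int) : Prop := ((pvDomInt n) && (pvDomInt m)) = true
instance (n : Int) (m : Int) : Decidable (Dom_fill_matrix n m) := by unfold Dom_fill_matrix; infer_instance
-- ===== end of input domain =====

-- B replaces A's nested per-cell accumulator loops with one flat list 1..n*m cut into rows by strided slices flat[r::n] (alternative decomposition).

-- ===== PORT A =====
-- row r: inner loop carries (nums, limit_cnt), appending limit_cnt and adding n each step
def fill_matrix (n : Int) (m : Int) : List (List Int) :=
  (PySem.List.pyRange 0 n 1).foldl (fun matrix r =>
    let limit_cnt : Int := 1 + r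
    let st := (PySem.List.pyRange 0 m 1).foldl
      (fun (st : List Int × Int) _c => (st.1 ++ [st.2], st.2 + n)) (([] : List Int), limit_cnt)
    matrix ++ [st.1]) []

-- ===== PORT B =====
-- flat = list(range(1, n*m+1)); rows are the strided slices flat[r::n].
-- Inside the comprehension r ranges over range(n), so n ≥ 1 and the slice step is
-- nonzero: slice? is always `some` there, and `.getD []` only totalises the expression.
-- The n ≤ 0 early return mirrors Python B's 'if n <= 0: return []'.
def fill_matrix_alt (n : Int) (m : Int) : List (List Int) :=
  if n ≤ 0 then []
  else
    let flat := PySem.List.pyRange 1 (n * m + 1) 1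
    (PySem.List.pyRange 0 n 1).map (fun r =>
      (PySem.List.slice? flat (some r) none n).getD [])

-- ===== PRECONDITION & SPEC =====
def Spec_fill_matrix (n : Int) (m : Int) (out : List (List Int)) : Prop := out = fill_matrix_alt n m
instance (n : Int) (m : Int) (out : List (List Int)) : Decidable (Spec_fill_matrix n m out) := by unfold Spec_fill_matrix; infer_instance

-- ===== CLAIM (what is proved, stated in full; the proofs are below) =====
def Claim_equal_fill_matrix : Prop := ∀ (n : Int) (m : Int), Dom_fill_matrix n m → Spec_fill_matrix n m (fill_matrix n m)

-- ===== LEMMAS AND PROOFS =====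

-- A's inner accumulator loop produces the closed-form row
theorem pv_inner (n : Int) (l : List Int) (acc : List Int) (v : Int) :
    (l.foldl (fun (st : List Int × Int) _c => (st.1 ++ [st.2], st.2 + n)) (acc, v)).1
      = acc ++ (List.range l.length).map (fun (k : Nat) => v + (k : Int) * n) := by
  induction l generalizing acc v with
  | nil => simp
  | cons x xs ih =>
      rw [List.foldl_cons, ih, List.length_cons, List.range_succ_eq_map,
        List.map_cons, List.map_map, List.append_assoc]
      congr 1
      simp only [Nat.cast_zero, zero_mul, add_zero, List.singleton_append, List.cons.injEq,
        true_and]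
      apply List.map_congr_left
      intro k _
      simp only [Function.comp_apply, Nat.cast_succ]
      ring

-- appending one element per step is a map
theorem pv_outer {α : Type} (g : Int → α) (l : List Int) (acc : List α) :
    l.foldl (fun mat r => mat ++ [g r]) acc = acc ++ l.map g := by
  induction l generalizing acc with
  | nil => simp
  | cons x xs ih => simp [ih]

-- B's strided slice of the flat list 1..n*m is exactly A's closed-form row
theorem pv_row (n m r : Int) (hr0 : 0 ≤ r) (hrn : r < n) :
    (PySem.List.slice? (PySem.List.pyRange 1 (n * m + 1) 1) (some r) none n).getD []
      = (List.range (PySem.List.pyRange 0 m 1).length).map (fun (k : Nat) => 1 + r + (k : Int) * n) := by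
  have hn : 0 < n := lt_of_le_of_lt hr0 hrn
  have hn0 : n ≠ 0 := ne_of_gt hn
  rw [PySem.List.pyRange_one 1 (n*m+1), PySem.List.pyRange_one 0 m]
  have hL1 : (n * m + 1 - 1).toNat = (n*m).toNat := by omega
  have hL2 : (m - 0).toNat = m.toNat := by omega
  rw [hL1, hL2]
  by_cases hm : 0 < m
  · -- m > 0 : the slice has exactly m elements
    have hnm : 0 < n * m := mul_pos hn hm
    have hLm : ((n*m).toNat : Int) = n * m := Int.toNat_of_nonneg (le_of_lt hnm)
    have hrL : r < n * m := lt_of_lt_of_le hrn (le_mul_of_one_le_right (le_of_lt hn) hm)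
    have hcnt : (n * m - r + n - 1) / n = m := by
      have h : n * m - r + n - 1 = (n - 1 - r) + m * n := by ring
      rw [h, Int.add_mul_ediv_right _ _ hn0, Int.ediv_eq_zero_of_lt (by omega) (by omega), zero_add]
    simp only [PySem.List.slice?, PySem.List.sliceIndices, hn0, List.length_map,
      List.length_range, hLm, if_neg (not_lt.mpr (le_of_lt hn)), if_neg (not_lt.mpr hr0),
      if_pos hn, min_eq_left (le_of_lt hrL), if_pos hrL, if_false, hcnt, Option.getD_some]
    have hcg : ∀ x ∈ List.range m.toNat,
        (List.map (fun (k : Nat) => 1 + (k : Int)) (List.range (n*m).toNat))[(r + n * (x : Int)).toNat]?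
          = (some ∘ fun (k : Nat) => 1 + r + (k : Int) * n) x := by
      intro x hx
      have hxm : (x : Int) < m := by
        have := List.mem_range.mp hx
        omega
      have hidx0 : 0 ≤ r + n * (x : Int) := add_nonneg hr0 (mul_nonneg (le_of_lt hn) (Int.natCast_nonneg x))
      have hidxL : r + n * (x : Int) < n * m := by nlinarith
      have hlt : (r + n * (x : Int)).toNat < (n*m).toNat := by omega
      simp only [List.getElem?_map, List.getElem?_range hlt, Option.map_some, Function.comp_apply,
        Option.some.injEq]
      push_cast [Int.toNat_of_nonneg hidx0]
      ring
    rw [List.filterMap_congr hcg, List.filterMap_eq_map]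
  · have h0 : (n*m).toNat = 0 := by
      have : n * m ≤ 0 := mul_nonpos_of_nonneg_of_nonpos (le_of_lt hn) (by omega)
      omega
    have hm0 : m.toNat = 0 := by omega
    rw [h0, hm0]
    simp [PySem.List.slice?, PySem.List.sliceIndices, hn0, not_lt.mpr (le_of_lt hn), hr0,
      not_lt.mpr hr0]

-- ===== VERDICT (by name: the statement is the Claim_ definition above) =====
theorem fill_matrix_spec : Claim_equal_fill_matrix := by
  intro n m _
  unfold Spec_fill_matrix fill_matrix fill_matrix_alt
  by_cases hn : n ≤ 0
  · rw [if_pos hn, PySem.List.pyRange_one 0 n,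
      show (n - 0).toNat = 0 by omega]
    simp
  · rw [if_neg hn, pv_outer]
    simp only [List.nil_append]
    apply List.map_congr_left
    intro r hr
    rw [pv_inner, List.nil_append]
    have hmem := PySem.List.mem_pyRange_one.mp hr
    rw [pv_row n m r hmem.1 hmem.2]
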